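-- pv_equiv track=rewrite | github.com/jimcarson/radio | adif_extract.py | _full_column_order
-- ===== SOURCE A (Python) =====
-- KEY_FIELDS = ["QSO_DATE", "TIME_ON", "CALL", "BAND", "MODE", "FREQ"]
--
-- def _full_column_order(all_fields: set[str],
--                        inspection_fields: list[str]) -> list[str]:
--     """
--     Build the Full Excel column order:
--       1. KEY_FIELDS that are present in the data
--       2. inspection_fields (preset/--fields) not already in KEY_FIELDS
--       3. all remaining fields, alphabetically
--     """
--     used: set[str] = set()
--     cols: list[str] = []
--
--     for f in KEY_FIELDS:
--         if f in all_fields: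
--             cols.append(f)
--             used.add(f)
--
--     for f in inspection_fields:
--         if f in all_fields and f not in used:
--             cols.append(f)
--             used.add(f)
--
--     for f in sorted(all_fields):
--         if f not in used:
--             cols.append(f)
--
--     return cols
-- ===== SOURCE B (Python) =====
-- KEY_FIELDS = ["QSO_DATE", "TIME_ON", "CALL", "BAND", "MODE", "FREQ"]
--
--
-- def _full_column_order(all_fields: set[str],
--                        inspection_fields: list[str]) -> list[str]:
--     # Decorate-and-sort: precompute a priority rank for every named field
--     # (KEY_FIELDS get 0..5, new inspection fields 6 + first position, all
--     # others a common big rank) and produce the whole order with one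
--     # sorted() call, tie-broken alphabetically.
--     rank = {}
--     i = 0
--     for f in inspection_fields:
--         if f not in rank:
--             rank[f] = len(KEY_FIELDS) + i
--         i += 1
--     i = 0
--     for f in KEY_FIELDS:
--         rank[f] = i
--         i += 1
--     big = len(KEY_FIELDS) + len(inspection_fields)
--     return sorted(all_fields, key=lambda f: (rank.get(f, big), f))
-- ===== Notes on version B (the rewrite author's own statement) =====
-- stated objective: alternative
-- what changed: Replaces A's three sequential membership-filtered loops threaded through a `used` set by a decorate-and-sort: a priority rank for every field is precomputed once in a dict (KEY_FIELDS position, then 6 + first inspection position, then a common big rank) and one sorted() call with the key (rank, name) produces the whole order.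
import Mathlib
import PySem

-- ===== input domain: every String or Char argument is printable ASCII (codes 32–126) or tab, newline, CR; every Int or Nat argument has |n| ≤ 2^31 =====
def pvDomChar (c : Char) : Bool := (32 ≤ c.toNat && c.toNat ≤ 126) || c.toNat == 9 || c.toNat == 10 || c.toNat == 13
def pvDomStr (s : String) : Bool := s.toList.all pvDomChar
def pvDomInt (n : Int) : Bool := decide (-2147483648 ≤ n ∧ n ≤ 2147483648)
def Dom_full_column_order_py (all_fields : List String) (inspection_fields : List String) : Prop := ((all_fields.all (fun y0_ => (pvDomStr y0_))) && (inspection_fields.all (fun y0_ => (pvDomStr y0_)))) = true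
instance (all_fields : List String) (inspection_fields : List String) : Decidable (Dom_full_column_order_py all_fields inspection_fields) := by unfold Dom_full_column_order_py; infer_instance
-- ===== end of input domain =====

-- ===== PORT A =====
-- B replaces A's three sequential loops threaded through a `used` set by a single
-- decorate-and-sort: one sort of all_fields by a computed priority key (objective: alternative).
def KEY_FIELDS_pv : List String := ["QSO_DATE", "TIME_ON", "CALL", "BAND", "MODE", "FREQ"]

def full_column_order_py (all_fields : List String) (inspection_fields : List String) : List String :=
  -- used: set[str] = set(); cols: list[str] = []; then the three for-loops, in order
  let st1 : List String × PySem.Set String :=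
    KEY_FIELDS_pv.foldl (fun st f =>
      if PySem.Set.contains all_fields f then (st.1 ++ [f], PySem.Set.add st.2 f) else st)
      ([], PySem.Set.empty)
  let st2 : List String × PySem.Set String :=
    inspection_fields.foldl (fun st f =>
      if PySem.Set.contains all_fields f && !(PySem.Set.contains st.2 f)
      then (st.1 ++ [f], PySem.Set.add st.2 f) else st) st1
  (PySem.List.sorted all_fields (fun x => x) false).foldl
    (fun cols f => if !(PySem.Set.contains st2.2 f) then cols ++ [f] else cols) st2.1

-- ===== PORT B =====
-- rank = {}; the two counting loops of Source B building the priority map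
def pvRankMap (inspection_fields : List String) : PySem.Dict String Int :=
  let r1 : PySem.Dict String Int × Int :=
    inspection_fields.foldl (fun st f =>
      if PySem.Dict.contains st.1 f then (st.1, st.2 + 1)
      else (PySem.Dict.insert st.1 f ((KEY_FIELDS_pv.length : Int) + st.2), st.2 + 1))
      (PySem.Dict.empty, 0)
  let r2 : PySem.Dict String Int × Int :=
    KEY_FIELDS_pv.foldl (fun st f => (PySem.Dict.insert st.1 f st.2, st.2 + 1)) (r1.1, 0)
  r2.1

-- big = len(KEY_FIELDS) + len(inspection_fields)
def pvBig (inspection_fields : List String) : Int :=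
  (KEY_FIELDS_pv.length : Int) + (inspection_fields.length : Int)

-- sorted(all_fields, key=lambda f: (rank.get(f, big), f))
def full_column_order_py_alt (all_fields : List String) (inspection_fields : List String) : List String :=
  let rankv := pvRankMap inspection_fields
  let bigv := pvBig inspection_fields
  PySem.List.sorted2 all_fields (fun f => PySem.Dict.getD rankv f bigv) (fun f => f) false

-- ===== PRECONDITION & SPEC =====
-- Pre_ only restates the type convention: all_fields ports a Python set, so the list holds
-- distinct elements; it excludes no input the Python function is ever called on.
def Pre_full_column_order_py (all_fields : List String) (inspection_fields : List String) : Prop :=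
  all_fields.Nodup
instance (all_fields : List String) (inspection_fields : List String) : Decidable (Pre_full_column_order_py all_fields inspection_fields) := by unfold Pre_full_column_order_py; infer_instance

def pvWitness_full_column_order_py : List String × List String := (["CALL", "AAA"], ["AAA"])

def Spec_full_column_order_py (all_fields : List String) (inspection_fields : List String) (out : List String) : Prop := out = full_column_order_py_alt all_fields inspection_fields
instance (all_fields : List String) (inspection_fields : List String) (out : List String) : Decidable (Spec_full_column_order_py all_fields inspection_fields out) := by unfold Spec_full_column_order_py; infer_instance

-- ===== CLAIM (what is proved, stated in full; the proofs are below) =====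
def Claim_equal_full_column_order_py : Prop := ∀ (all_fields : List String) (inspection_fields : List String), Dom_full_column_order_py all_fields inspection_fields → Pre_full_column_order_py all_fields inspection_fields → Spec_full_column_order_py all_fields inspection_fields (full_column_order_py all_fields inspection_fields)

-- ===== LEMMAS AND PROOFS =====

-- sorted2 with keys k1, k2 is sorted with the lexicographic key f ↦ (k1 f, k2 f)
theorem pv_sorted2_eq_sorted_lex {α κ₁ κ₂ : Type} [LinearOrder κ₁] [LinearOrder κ₂]
    (xs : List α) (k1 : α → κ₁) (k2 : α → κ₂) :
    PySem.List.sorted2 xs k1 k2 false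
      = PySem.List.sorted xs (fun x => toLex (k1 x, k2 x)) false := by
  have hcmp : (fun a b => decide (toLex (k1 a, k2 a) < toLex (k1 b, k2 b)))
      = (fun a b => decide (k1 a < k1 b) || (!decide (k1 b < k1 a) && decide (k2 a < k2 b))) := by
    funext a b
    by_cases h1 : k1 a < k1 b
    · simp [Prod.Lex.toLex_lt_toLex, h1]
    · by_cases h2 : k1 b < k1 a
      · simp [Prod.Lex.toLex_lt_toLex, h1, h2, (ne_of_gt h2 : k1 a ≠ k1 b)]
      · have he : k1 a = k1 b := le_antisymm (not_lt.1 h2) (not_lt.1 h1)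
        simp [Prod.Lex.toLex_lt_toLex, he]
  rw [PySem.List.sorted_eq_foldl_insertBy, hcmp]
  rfl

-- A's first loop: cols collects the keys present, and `used` has the same members as cols.
theorem pv_fold1 (p : String → Bool) (keys : List String) : ∀ (c u : List String),
    (∀ x, x ∈ u ↔ x ∈ c) →
    (keys.foldl (fun (st : List String × PySem.Set String) f =>
        if p f then (st.1 ++ [f], PySem.Set.add st.2 f) else st) (c, u)).1 = c ++ keys.filter p
    ∧ (∀ x, x ∈ (keys.foldl (fun (st : List String × PySem.Set String) f =>
        if p f then (st.1 ++ [f], PySem.Set.add st.2 f) else st) (c, u)).2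
        ↔ x ∈ (keys.foldl (fun (st : List String × PySem.Set String) f =>
        if p f then (st.1 ++ [f], PySem.Set.add st.2 f) else st) (c, u)).1) := by
  induction keys with
  | nil => intro c u h; simpa using h
  | cons f rest ih =>
    intro c u h
    by_cases hp : p f = true
    · have := ih (c ++ [f]) (PySem.Set.add u f)
        (by intro x; simp [PySem.Set.mem_add, h x])
      simpa [hp, List.filter_cons, List.append_assoc] using this
    · have := ih c u h
      simpa [hp, List.filter_cons] using this

-- proof-side recursion describing which inspection fields A's second loop appends
def pvSel (all : List String) : List String → List String → List String
  | [], _ => []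
  | f :: r, c =>
    if PySem.Set.contains all f && !(c.contains f) then f :: pvSel all r (c ++ [f])
    else pvSel all r c

-- A's second loop appends exactly pvSel, and the carried set keeps the members of cols.
theorem pv_fold2_sel (all : List String) (insp : List String) : ∀ (c u : List String),
    (∀ x, x ∈ u ↔ x ∈ c) →
    (insp.foldl (fun (st : List String × PySem.Set String) f =>
        if PySem.Set.contains all f && !(PySem.Set.contains st.2 f)
        then (st.1 ++ [f], PySem.Set.add st.2 f) else st) (c, u)).1 = c ++ pvSel all insp c
    ∧ (∀ x, x ∈ (insp.foldl (fun (st : List String × PySem.Set String) f =>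
        if PySem.Set.contains all f && !(PySem.Set.contains st.2 f)
        then (st.1 ++ [f], PySem.Set.add st.2 f) else st) (c, u)).2
        ↔ x ∈ (insp.foldl (fun (st : List String × PySem.Set String) f =>
        if PySem.Set.contains all f && !(PySem.Set.contains st.2 f)
        then (st.1 ++ [f], PySem.Set.add st.2 f) else st) (c, u)).1) := by
  induction insp with
  | nil => intro c u h; exact ⟨by simp [pvSel], by simpa using h⟩
  | cons f rest ih =>
    intro c u h
    by_cases hc : f ∈ all ∧ f ∉ c
    · have hu : f ∉ u := fun m => hc.2 ((h f).1 m)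
      have := ih (c ++ [f]) (PySem.Set.add u f)
        (by intro x; simp [PySem.Set.mem_add, h x])
      simpa [pvSel, hc.1, hc.2, hu, List.append_assoc] using this
    · have hc' : ¬ (f ∈ all ∧ f ∉ u) := fun m => hc ⟨m.1, fun mc => m.2 ((h f).2 mc)⟩
      have := ih c u h
      rcases Decidable.not_and_iff_not_or_not.1 hc with hna | hnc
      · simpa [pvSel, hna] using this
      · have hfc : f ∈ c := Decidable.not_not.1 hnc
        have hfu : f ∈ u := (h f).2 hfc
        simpa [pvSel, hfc, hfu] using this

-- elements appended by the second loop: in insp, in all_fields, not already chosen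
theorem pv_sel_mem (all : List String) :
    ∀ (l c : List String) (x : String), x ∈ pvSel all l c → x ∈ l ∧ x ∈ all ∧ x ∉ c := by
  intro l
  induction l with
  | nil => intro c x hx; simp [pvSel] at hx
  | cons f r ih =>
    intro c x hx
    by_cases hc : f ∈ all ∧ f ∉ c
    · rw [pvSel, if_pos (by simp [hc.1, hc.2])] at hx
      rcases List.mem_cons.1 hx with rfl | hx'
      · exact ⟨List.mem_cons_self, hc.1, hc.2⟩
      · obtain ⟨h1, h2, h3⟩ := ih (c ++ [f]) x hx'
        exact ⟨List.mem_cons_of_mem _ h1, h2, fun m => h3 (List.mem_append_left _ m)⟩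
    · rw [pvSel, if_neg (by simpa [Decidable.not_and_iff_not_or_not] using hc)] at hx
      obtain ⟨h1, h2, h3⟩ := ih c x hx
      exact ⟨List.mem_cons_of_mem _ h1, h2, h3⟩
  -- (the `if` condition is Boolean; the by_cases above matches it through simp)

-- a field of insp that is in all_fields and not yet chosen does get appended
theorem pv_mem_sel (all : List String) :
    ∀ (l c : List String) (x : String), x ∈ l → x ∈ all → x ∉ c → x ∈ pvSel all l c := by
  intro l
  induction l with
  | nil => intro c x hx; simp at hx
  | cons f r ih =>
    intro c x hx hall hc
    by_cases hf : f ∈ all ∧ f ∉ c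
    · rw [pvSel, if_pos (by simp [hf.1, hf.2])]
      rcases List.mem_cons.1 hx with rfl | hx'
      · exact List.mem_cons_self
      · by_cases hxf : x = f
        · subst hxf; exact List.mem_cons_self
        · exact List.mem_cons_of_mem _
            (ih (c ++ [f]) x hx' hall (by simp [hc, hxf]))
    · rw [pvSel, if_neg (by simpa [Decidable.not_and_iff_not_or_not] using hf)]
      rcases List.mem_cons.1 hx with rfl | hx'
      · exact absurd ⟨hall, hc⟩ hf
      · exact ih c x hx' hall hc

-- appended fields appear in order of first occurrence in insp
theorem pv_sel_pairwise (all : List String) :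
    ∀ (l c : List String), (pvSel all l c).Pairwise (fun a b => l.idxOf a < l.idxOf b) := by
  intro l
  induction l with
  | nil => intro c; simp [pvSel]
  | cons f r ih =>
    intro c
    by_cases hf : f ∈ all ∧ f ∉ c
    · rw [pvSel, if_pos (by simp [hf.1, hf.2])]
      refine List.Pairwise.cons ?_ ?_
      · intro b hb
        have hbf : b ≠ f := fun h =>
          (pv_sel_mem all r (c ++ [f]) b hb).2.2 (by simp [h])
        simp [List.idxOf_cons_self, List.idxOf_cons_ne _ (Ne.symm hbf)]
      · refine ((ih (c ++ [f])).imp_of_mem ?_)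
        intro a b ha hb hab
        have haf : a ≠ f := fun h =>
          (pv_sel_mem all r (c ++ [f]) a ha).2.2 (by simp [h])
        have hbf : b ≠ f := fun h =>
          (pv_sel_mem all r (c ++ [f]) b hb).2.2 (by simp [h])
        simpa [List.idxOf_cons_ne _ (Ne.symm haf), List.idxOf_cons_ne _ (Ne.symm hbf)] using hab
    · rw [pvSel, if_neg (by simpa [Decidable.not_and_iff_not_or_not] using hf)]
      refine ((ih c).imp_of_mem ?_)
      intro a b ha hb hab
      have haf : a ≠ f := by
        rintro rfl
        exact hf ⟨(pv_sel_mem all r c a ha).2.1, (pv_sel_mem all r c a ha).2.2⟩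
      have hbf : b ≠ f := by
        rintro rfl
        exact hf ⟨(pv_sel_mem all r c b hb).2.1, (pv_sel_mem all r c b hb).2.2⟩
      simpa [List.idxOf_cons_ne _ (Ne.symm haf), List.idxOf_cons_ne _ (Ne.symm hbf)] using hab

-- a filter of a duplicate-free list is pairwise increasing in idxOf
theorem pv_filter_pairwise_idx (l : List String) (hl : l.Nodup) (p : String → Bool) :
    (l.filter p).Pairwise (fun a b => l.idxOf a < l.idxOf b) := by
  induction l with
  | nil => simp
  | cons x r ih =>
    have hxr : x ∉ r := (List.nodup_cons.1 hl).1
    have hr := ih (List.nodup_cons.1 hl).2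
    by_cases hp : p x = true
    · rw [List.filter_cons_of_pos hp]
      refine List.Pairwise.cons ?_ ?_
      · intro b hb
        have hbr : b ∈ r := List.mem_of_mem_filter hb
        have hbx : b ≠ x := fun h => hxr (h ▸ hbr)
        simp [List.idxOf_cons_self, List.idxOf_cons_ne _ (Ne.symm hbx)]
      · refine hr.imp_of_mem ?_
        intro a b ha hb hab
        have hax : a ≠ x := fun h => hxr (h ▸ List.mem_of_mem_filter ha)
        have hbx : b ≠ x := fun h => hxr (h ▸ List.mem_of_mem_filter hb)
        simpa [List.idxOf_cons_ne _ (Ne.symm hax), List.idxOf_cons_ne _ (Ne.symm hbx)] using hab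
    · rw [List.filter_cons_of_neg hp]
      refine hr.imp_of_mem ?_
      intro a b ha hb hab
      have hax : a ≠ x := fun h => hxr (h ▸ List.mem_of_mem_filter ha)
      have hbx : b ≠ x := fun h => hxr (h ▸ List.mem_of_mem_filter hb)
      simpa [List.idxOf_cons_ne _ (Ne.symm hax), List.idxOf_cons_ne _ (Ne.symm hbx)] using hab

-- covering permutation: a nodup list is a nodup sublist plus the rest
theorem pv_perm_cover (l s : List String) (hl : l.Nodup) (hs : s.Nodup)
    (hsub : ∀ x ∈ s, x ∈ l) :
    l.Perm (s ++ l.filter (fun x => !s.contains x)) := by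
  have h1 : (l.filter (fun x => s.contains x)).Perm s := by
    rw [List.perm_ext_iff_of_nodup (hl.filter _) hs]
    intro a
    simp only [List.mem_filter, List.contains_iff_mem]
    exact ⟨fun h => h.2, fun h => ⟨hsub a h, h⟩⟩
  exact ((List.filter_append_perm _ l).symm).trans (h1.append_right _)

-- filter commutes with sorting a duplicate-free list
theorem pv_sorted_filter (all_fields : List String) (h : all_fields.Nodup) (q : String → Bool) :
    (PySem.List.sorted all_fields (fun x => x) false).filter q
      = PySem.List.sorted (all_fields.filter q) (fun x => x) false := by
  have hp : (PySem.List.sorted all_fields (fun x => x) false).Perm all_fields :=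
    PySem.List.sorted_perm all_fields (fun x => x) false
  have hperm : ((PySem.List.sorted all_fields (fun x => x) false).filter q).Perm
      (all_fields.filter q) := hp.filter q
  have hle : (PySem.List.sorted all_fields (fun x => x) false).Pairwise (fun a b => a ≤ b) :=
    PySem.List.sorted_pairwise all_fields (fun x => x)
  have hnd : (PySem.List.sorted all_fields (fun x => x) false).Nodup := hp.nodup_iff.mpr h
  have hlt : (PySem.List.sorted all_fields (fun x => x) false).Pairwise (fun a b => a < b) :=
    (hle.and hnd).imp (fun hab => lt_of_le_of_ne hab.1 hab.2)
  exact (PySem.List.sorted_eq_of_perm_of_pairwise_lt _ _ _ hperm (hlt.filter q)).symm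

-- proof-side name for B's sort key
def pvRank (inspection_fields : List String) (f : String) : Int :=
  PySem.Dict.getD (pvRankMap inspection_fields) f (pvBig inspection_fields)

-- Source B's first loop: `rank` maps each inspection field to big-base + its first index
theorem pv_dict_fold_insp (insp : List String) : ∀ (d : PySem.Dict String Int) (i : Int)
    (f : String),
    PySem.Dict.get? ((insp.foldl (fun st f =>
        if PySem.Dict.contains st.1 f then (st.1, st.2 + 1)
        else (PySem.Dict.insert st.1 f ((KEY_FIELDS_pv.length : Int) + st.2), st.2 + 1))
        (d, i)).1) f
      = if (PySem.Dict.get? d f).isSome then PySem.Dict.get? d f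
        else if f ∈ insp then some ((KEY_FIELDS_pv.length : Int) + i + (insp.idxOf f : Int))
        else none := by
  induction insp with
  | nil =>
    intro d i f
    by_cases h : (PySem.Dict.get? d f).isSome
    · simp [h]
    · simp [h, Option.not_isSome_iff_eq_none.1 h]
  | cons x r ih =>
    intro d i f
    by_cases hc : PySem.Dict.contains d x = true
    · rw [List.foldl_cons, if_pos hc]
      rw [ih d (i + 1) f]
      by_cases hs : (PySem.Dict.get? d f).isSome
      · simp [hs]
      · have hx : (PySem.Dict.get? d x).isSome := by
          rwa [← PySem.Dict.contains_eq_isSome_get?]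
        have hfx : f ≠ x := fun h => hs (h ▸ hx)
        rw [if_neg hs, if_neg hs]
        by_cases hfr : f ∈ r
        · rw [if_pos hfr, if_pos (List.mem_cons_of_mem _ hfr),
            List.idxOf_cons_ne _ (Ne.symm hfx)]
          push_cast
          ring_nf
        · rw [if_neg hfr, if_neg (by simp [hfx, hfr])]
    · rw [List.foldl_cons, if_neg hc]
      rw [ih _ (i + 1) f]
      have hdx : PySem.Dict.get? d x = none := by
        rw [← Option.not_isSome_iff_eq_none, ← PySem.Dict.contains_eq_isSome_get?]
        simpa using hc
      by_cases hfx : f = x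
      · subst hfx
        rw [if_pos (by simp [PySem.Dict.get?_insert_self]),
          PySem.Dict.get?_insert_self, if_neg (by simp [hdx]),
          if_pos List.mem_cons_self, List.idxOf_cons_self]
        norm_num
      · rw [PySem.Dict.get?_insert_of_ne _ _ hfx]
        by_cases hs : (PySem.Dict.get? d f).isSome
        · simp [hs]
        · rw [if_neg hs, if_neg hs]
          by_cases hfr : f ∈ r
          · rw [if_pos hfr, if_pos (List.mem_cons_of_mem _ hfr),
              List.idxOf_cons_ne _ (Ne.symm hfx)]
            push_cast
            ring_nf
          · rw [if_neg hfr, if_neg (by simp [hfx, hfr])]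

-- Source B's second loop: key fields overwrite with their KEY_FIELDS position
theorem pv_dict_fold_key : ∀ (l : List String), l.Nodup → ∀ (d : PySem.Dict String Int)
    (i : Int) (f : String),
    PySem.Dict.get? ((l.foldl (fun st f => (PySem.Dict.insert st.1 f st.2, st.2 + 1))
        (d, i)).1) f
      = if f ∈ l then some (i + (l.idxOf f : Int)) else PySem.Dict.get? d f := by
  intro l
  induction l with
  | nil => intro _ d i f; simp
  | cons x r ih =>
    intro hnd d i f
    rw [List.foldl_cons, ih (List.nodup_cons.1 hnd).2 _ (i + 1) f]
    by_cases hfr : f ∈ r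
    · have hfx : f ≠ x := fun h => (List.nodup_cons.1 hnd).1 (h ▸ hfr)
      rw [if_pos hfr, if_pos (List.mem_cons_of_mem _ hfr),
        List.idxOf_cons_ne _ (Ne.symm hfx)]
      push_cast
      ring_nf
    · rw [if_neg hfr]
      by_cases hfx : f = x
      · subst hfx
        rw [PySem.Dict.get?_insert_self, if_pos List.mem_cons_self, List.idxOf_cons_self]
        norm_num
      · rw [PySem.Dict.get?_insert_of_ne _ _ hfx, if_neg (by simp [hfx, hfr])]

-- the priority map, read back as a function
theorem pv_rank_get? (insp : List String) (f : String) :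
    PySem.Dict.get? (pvRankMap insp) f
      = if f ∈ KEY_FIELDS_pv then some ((KEY_FIELDS_pv.idxOf f : Nat) : Int)
        else if f ∈ insp then some ((KEY_FIELDS_pv.length : Int) + (insp.idxOf f : Int))
        else none := by
  have hKnodup : KEY_FIELDS_pv.Nodup := by decide
  simp only [pvRankMap]
  rw [pv_dict_fold_key KEY_FIELDS_pv hKnodup _ 0 f, pv_dict_fold_insp insp PySem.Dict.empty 0 f]
  by_cases hK : f ∈ KEY_FIELDS_pv
  · rw [if_pos hK, if_pos hK]
    norm_num
  · rw [if_neg hK, if_neg hK]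
    simp [PySem.Dict.get?_empty]

-- rank evaluation: key fields
theorem pv_rank_of_key (insp : List String) (f : String) (h : f ∈ KEY_FIELDS_pv) :
    pvRank insp f = (KEY_FIELDS_pv.idxOf f : Int) ∧ pvRank insp f < 6 := by
  have h1 : pvRank insp f = (KEY_FIELDS_pv.idxOf f : Int) := by
    rw [pvRank, PySem.Dict.getD_eq_get?_getD, pv_rank_get?, if_pos h]
    rfl
  have hlt : KEY_FIELDS_pv.idxOf f < KEY_FIELDS_pv.length := List.idxOf_lt_length_of_mem h
  have h6 : KEY_FIELDS_pv.length = 6 := by decide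
  exact ⟨h1, by rw [h1]; omega⟩

-- rank evaluation: inspection fields that are not key fields
theorem pv_rank_of_insp (insp : List String) (f : String) (hk : f ∉ KEY_FIELDS_pv)
    (hi : f ∈ insp) :
    pvRank insp f = 6 + (insp.idxOf f : Int) ∧ pvRank insp f < 6 + (insp.length : Int) := by
  have h1 : pvRank insp f = 6 + (insp.idxOf f : Int) := by
    rw [pvRank, PySem.Dict.getD_eq_get?_getD, pv_rank_get?, if_neg hk, if_pos hi]
    norm_num [KEY_FIELDS_pv]
  have hlt : insp.idxOf f < insp.length := List.idxOf_lt_length_of_mem hi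
  exact ⟨h1, by rw [h1]; omega⟩

-- rank evaluation: remaining fields
theorem pv_rank_of_other (insp : List String) (f : String) (hk : f ∉ KEY_FIELDS_pv)
    (hi : f ∉ insp) : pvRank insp f = 6 + (insp.length : Int) := by
  rw [pvRank, PySem.Dict.getD_eq_get?_getD, pv_rank_get?, if_neg hk, if_neg hi]
  norm_num [pvBig, KEY_FIELDS_pv]

-- ===== VERDICT (by name: the statement is the Claim_ definition above) =====
set_option maxHeartbeats 1600000 in
theorem full_column_order_py_spec : Claim_equal_full_column_order_py := by
  intro all_fields inspection_fields _hd hpre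
  unfold Spec_full_column_order_py
  -- characterize A's output as C ++ sorted(remaining)
  obtain ⟨h11, h12⟩ := pv_fold1 (fun f => PySem.Set.contains all_fields f) KEY_FIELDS_pv []
    PySem.Set.empty (by simp [PySem.Set.empty])
  simp only [full_column_order_py, full_column_order_py_alt]
  set key := KEY_FIELDS_pv.filter (fun f => PySem.Set.contains all_fields f) with hkeydef
  set st1 := KEY_FIELDS_pv.foldl (fun (st : List String × PySem.Set String) f =>
      if PySem.Set.contains all_fields f then (st.1 ++ [f], PySem.Set.add st.2 f) else st)
      ([], PySem.Set.empty) with hst1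
  have h11' : st1.1 = key := by simpa using h11
  obtain ⟨h21, h22⟩ := pv_fold2_sel all_fields inspection_fields st1.1 st1.2 h12
  rw [show (st1.1, st1.2) = st1 from rfl] at h21 h22
  set C := key ++ pvSel all_fields inspection_fields key with hCdef
  set st2 := inspection_fields.foldl (fun (st : List String × PySem.Set String) f =>
      if PySem.Set.contains all_fields f && !(PySem.Set.contains st.2 f)
      then (st.1 ++ [f], PySem.Set.add st.2 f) else st) st1 with hst2
  have h21' : st2.1 = C := by rw [h21, h11']
  rw [PySem.List.foldl_append_if_eq_filter]
  have hfil : (PySem.List.sorted all_fields (fun x => x) false).filter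
        (fun f => !(PySem.Set.contains st2.2 f))
      = (PySem.List.sorted all_fields (fun x => x) false).filter
        (fun f => !(List.contains C f)) := by
    apply List.filter_congr
    intro a _
    have hiff : a ∈ st2.2 ↔ a ∈ C := (h22 a).trans (by rw [h21'])
    by_cases hx : a ∈ C
    · simp [hiff.2 hx, hx]
    · have hx2 : a ∉ st2.2 := fun m => hx (hiff.1 m)
      simp [hx, hx2]
  rw [h21', hfil, pv_sorted_filter all_fields hpre]
  -- facts about key and the selected inspection fields
  have hKnodup : KEY_FIELDS_pv.Nodup := by decide
  have hK6 : KEY_FIELDS_pv.length = 6 := by decide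
  have hkeyK : ∀ x ∈ key, x ∈ KEY_FIELDS_pv := fun x hx => (List.mem_filter.1 hx).1
  have hkeyall : ∀ x ∈ key, x ∈ all_fields := by
    intro x hx
    have := (List.mem_filter.1 hx).2
    simpa using this
  have hkeyN : key.Nodup := hKnodup.filter _
  have hselN : (pvSel all_fields inspection_fields key).Nodup :=
    (pv_sel_pairwise all_fields inspection_fields key).imp
      (fun hab => by rintro rfl; exact lt_irrefl _ hab)
  have hdisj : key.Disjoint (pvSel all_fields inspection_fields key) := by
    intro a ha hs
    exact (pv_sel_mem all_fields inspection_fields key a hs).2.2 ha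
  have hCN : C.Nodup := by
    rw [hCdef, List.nodup_append]
    exact ⟨hkeyN, hselN, fun a ha b hb => fun he => hdisj ha (he ▸ hb)⟩
  have hCsub : ∀ x ∈ C, x ∈ all_fields := by
    intro x hx
    rcases List.mem_append.1 hx with hx | hx
    · exact hkeyall x hx
    · exact (pv_sel_mem all_fields inspection_fields key x hx).2.1
  have hKmemkey : ∀ x, x ∈ KEY_FIELDS_pv → x ∈ all_fields → x ∈ key := by
    intro x h1 h2
    exact List.mem_filter.2 ⟨h1, by simpa using h2⟩
  have hselnotK : ∀ x ∈ pvSel all_fields inspection_fields key, x ∉ KEY_FIELDS_pv := by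
    intro x hx hxK
    obtain ⟨_, hall, hnc⟩ := pv_sel_mem all_fields inspection_fields key x hx
    exact hnc (hKmemkey x hxK hall)
  -- the tail: remaining fields, sorted, all of common (maximal) rank
  set tail := PySem.List.sorted (all_fields.filter (fun f => !(List.contains C f)))
      (fun x => x) false with htaildef
  have htailmem : ∀ x ∈ tail, x ∈ all_fields ∧ x ∉ C := by
    intro x hx
    rw [htaildef] at hx
    have h1 := List.mem_filter.1 ((PySem.List.mem_sorted _ _ _ x).1 hx)
    refine ⟨h1.1, ?_⟩
    have := h1.2
    simpa using this
  have htailrank : ∀ x ∈ tail, pvRank inspection_fields x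
      = 6 + (inspection_fields.length : Int) := by
    intro x hx
    obtain ⟨hall, hnC⟩ := htailmem x hx
    have hxK : x ∉ KEY_FIELDS_pv := fun h =>
      hnC (List.mem_append_left _ (hKmemkey x h hall))
    have hxI : x ∉ inspection_fields := by
      intro h
      have hxkey : x ∉ key := fun m => hnC (List.mem_append_left _ m)
      exact hnC (List.mem_append_right _
        (pv_mem_sel all_fields inspection_fields key x h hall hxkey))
    exact pv_rank_of_other inspection_fields x hxK hxI
  have htailpair : tail.Pairwise (fun a b => a < b) := by
    have hp : tail.Perm (all_fields.filter (fun f => !(List.contains C f))) :=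
      PySem.List.sorted_perm _ _ _
    have hle : tail.Pairwise (fun a b => a ≤ b) := PySem.List.sorted_pairwise _ _
    have hnd : tail.Nodup := hp.nodup_iff.mpr (hpre.filter _)
    exact (hle.and hnd).imp (fun hab => lt_of_le_of_ne hab.1 hab.2)
  -- rank bounds inside C
  have hCrank : ∀ x ∈ C, pvRank inspection_fields x < 6 + (inspection_fields.length : Int) := by
    intro x hx
    rcases List.mem_append.1 hx with hx | hx
    · have := (pv_rank_of_key inspection_fields x (hkeyK x hx)).2
      have h0 : (0 : Int) ≤ (inspection_fields.length : Int) := Int.natCast_nonneg _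
      omega
    · obtain ⟨hI, _, _⟩ := pv_sel_mem all_fields inspection_fields key x hx
      exact (pv_rank_of_insp inspection_fields x (hselnotK x hx) hI).2
  -- the full output is strictly increasing in the lexicographic key
  have hpair : (C ++ tail).Pairwise (fun a b =>
      toLex (pvRank inspection_fields a, a) < toLex (pvRank inspection_fields b, b)) := by
    rw [List.pairwise_append]
    refine ⟨?_, ?_, ?_⟩
    · rw [hCdef, List.pairwise_append]
      refine ⟨?_, ?_, ?_⟩
      · refine (pv_filter_pairwise_idx KEY_FIELDS_pv hKnodup _).imp_of_mem ?_
        intro a b ha hb hab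
        rw [Prod.Lex.toLex_lt_toLex]
        left
        show pvRank inspection_fields a < pvRank inspection_fields b
        rw [(pv_rank_of_key inspection_fields a (hkeyK a ha)).1,
          (pv_rank_of_key inspection_fields b (hkeyK b hb)).1]
        exact_mod_cast hab
      · refine (pv_sel_pairwise all_fields inspection_fields key).imp_of_mem ?_
        intro a b ha hb hab
        rw [Prod.Lex.toLex_lt_toLex]
        left
        show pvRank inspection_fields a < pvRank inspection_fields b
        rw [(pv_rank_of_insp inspection_fields a (hselnotK a ha)
            (pv_sel_mem all_fields inspection_fields key a ha).1).1,
          (pv_rank_of_insp inspection_fields b (hselnotK b hb)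
            (pv_sel_mem all_fields inspection_fields key b hb).1).1]
        omega
      · intro a ha b hb
        rw [Prod.Lex.toLex_lt_toLex]
        left
        show pvRank inspection_fields a < pvRank inspection_fields b
        have h1 := (pv_rank_of_key inspection_fields a (hkeyK a ha)).2
        have h2 := (pv_rank_of_insp inspection_fields b (hselnotK b hb)
            (pv_sel_mem all_fields inspection_fields key b hb).1).1
        have h0 : (0 : Int) ≤ (inspection_fields.idxOf b : Int) := Int.natCast_nonneg _
        omega
    · refine htailpair.imp_of_mem ?_
      intro a b ha hb hab
      rw [Prod.Lex.toLex_lt_toLex]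
      right
      refine ⟨?_, hab⟩
      show pvRank inspection_fields a = pvRank inspection_fields b
      rw [htailrank a ha, htailrank b hb]
    · intro a ha b hb
      rw [Prod.Lex.toLex_lt_toLex]
      left
      show pvRank inspection_fields a < pvRank inspection_fields b
      rw [htailrank b hb]
      exact hCrank a ha
  -- the full output is a permutation of all_fields
  have hperm : (C ++ tail).Perm all_fields := by
    have h1 : tail.Perm (all_fields.filter (fun f => !(List.contains C f))) :=
      PySem.List.sorted_perm _ _ _
    exact ((h1.append_left C).trans (pv_perm_cover all_fields C hpre hCN hCsub).symm)
  -- B's single sort produces exactly that list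
  rw [show (fun f => PySem.Dict.getD (pvRankMap inspection_fields) f (pvBig inspection_fields))
      = pvRank inspection_fields from rfl]
  rw [pv_sorted2_eq_sorted_lex all_fields (pvRank inspection_fields) (fun f => f)]
  exact (PySem.List.sorted_eq_of_perm_of_pairwise_lt all_fields (C ++ tail) _ hperm hpair).symm
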